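-- pv_equiv track=rewrite | github.com/kevinveenbirkenbach/infinito-nexus | tests/lint/repository/test_no_inline_multiline_php_in_sh.py | _has_unescaped
-- ===== SOURCE A (Python) =====
-- def _has_unescaped(segment: str, quote: str) -> bool:
--     """Return True if *segment* contains *quote* not preceded by an odd
--     number of backslashes. Bash single-quoted strings cannot be escaped
--     at all (a literal ``'`` must close the string), but we treat the
--     rule uniformly — a stray escaped quote inside a double-quoted body
--     is still unlikely to terminate.
--     """
--     i = 0
--     while i < len(segment):
--         c = segment[i]
--         if c == quote:
--             backslashes = 0
--             j = i - 1
--             while j >= 0 and segment[j] == "\\":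
--                 backslashes += 1
--                 j -= 1
--             if backslashes % 2 == 0:
--                 return True
--         i += 1
--     return False
-- ===== SOURCE B (Python) =====
-- def _has_unescaped(segment: str, quote: str) -> bool:
--     # One forward pass keeping a running count of the consecutive
--     # backslashes immediately before the current character.
--     bs = 0
--     for c in segment:
--         if c == quote and bs % 2 == 0:
--             return True
--         bs = bs + 1 if c == "\\" else 0
--     return False
-- ===== Notes on version B (the rewrite author's own statement) =====
-- stated objective: faster
-- what changed: Replaces the index-driven nested loop that re-scans the preceding backslash run at every quote occurrence by a single forward pass maintaining a running consecutive-backslash counter.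
import Mathlib
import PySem

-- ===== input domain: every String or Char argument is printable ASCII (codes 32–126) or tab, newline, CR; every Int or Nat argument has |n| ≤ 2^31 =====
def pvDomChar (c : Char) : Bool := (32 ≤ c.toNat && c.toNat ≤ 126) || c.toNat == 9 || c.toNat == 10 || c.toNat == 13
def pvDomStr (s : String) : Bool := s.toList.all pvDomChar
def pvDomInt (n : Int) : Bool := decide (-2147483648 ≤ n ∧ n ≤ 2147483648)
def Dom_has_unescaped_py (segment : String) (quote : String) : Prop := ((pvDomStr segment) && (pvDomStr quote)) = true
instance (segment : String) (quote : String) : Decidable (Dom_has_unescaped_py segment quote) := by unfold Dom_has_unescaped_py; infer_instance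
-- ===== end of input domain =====

-- B replaces A's backward re-scan of preceding backslashes at each quote
-- occurrence by a single forward pass with a running backslash counter (alternative decomposition).


-- ===== PORT A =====
-- A's inner while loop: count the backslashes at positions i-1, i-2, …, i.e. the
-- leading backslashes of the reversed prefix before the current character.
def pvCountBS : List Char → Nat
  | [] => 0
  | c :: rest => if c = '\\' then pvCountBS rest + 1 else 0

-- A's outer while loop: walk the characters in order, carrying the reversed
-- prefix already passed (segment[i-1], segment[i-2], …).
def pvALoop (quote : String) : List Char → List Char → Bool
  | [], _ => false
  | c :: rest, rev =>
    if c.toString = quote then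
      if pvCountBS rev % 2 = 0 then true
      else pvALoop quote rest (c :: rev)
    else pvALoop quote rest (c :: rev)

def has_unescaped_py (segment : String) (quote : String) : Bool :=
  pvALoop quote segment.toList []

-- ===== PORT B =====
def pvBLoop (quote : String) : List Char → Nat → Bool
  | [], _ => false
  | c :: rest, bs =>
    if c.toString = quote && bs % 2 == 0 then true
    else pvBLoop quote rest (if c = '\\' then bs + 1 else 0)

def has_unescaped_py_alt (segment : String) (quote : String) : Bool :=
  pvBLoop quote segment.toList 0

-- ===== PRECONDITION & SPEC =====
def Spec_has_unescaped_py (segment : String) (quote : String) (out : Bool) : Prop := out = has_unescaped_py_alt segment quote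
instance (segment : String) (quote : String) (out : Bool) : Decidable (Spec_has_unescaped_py segment quote out) := by unfold Spec_has_unescaped_py; infer_instance

-- ===== CLAIM (what is proved, stated in full; the proofs are below) =====
def Claim_equal_has_unescaped_py : Prop := ∀ (segment : String) (quote : String), Dom_has_unescaped_py segment quote → Spec_has_unescaped_py segment quote (has_unescaped_py segment quote)

-- ===== LEMMAS AND PROOFS =====
-- Invariant: B's running counter equals the number of leading backslashes of
-- the reversed prefix that A's inner loop would count.
theorem pvLoop_eq (quote : String) (rest : List Char) :
    ∀ rev bs, pvCountBS rev = bs → pvALoop quote rest rev = pvBLoop quote rest bs := by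
  induction rest with
  | nil => intro rev bs _; rfl
  | cons c rest ih =>
    intro rev bs h
    have hstep : pvCountBS (c :: rev) = (if c = '\\' then bs + 1 else 0) := by
      simp [pvCountBS, h]
    simp only [pvALoop, pvBLoop, Char.toString]
    by_cases hq : String.singleton c = quote
    · by_cases he : bs % 2 = 0
      · simp [hq, h, he]
      · simp [hq, h, he, ih _ _ hstep]
    · simp [hq, ih _ _ hstep]

-- ===== VERDICT (by name: the statement is the Claim_ definition above) =====
theorem has_unescaped_py_spec : Claim_equal_has_unescaped_py := by
  intro segment quote _
  unfold Spec_has_unescaped_py has_unescaped_py has_unescaped_py_alt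
  exact pvLoop_eq quote segment.toList [] 0 rfl
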